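-- pv_equiv track=rewrite | github.com/tlucanti/contest | Codeforces/div803/C.py | solve
-- ===== SOURCE A (Python) =====
-- def solve(a):
--     n = len(a)
--     s = set(a)
--     for i in range(n):
--         for j in range(i + 1, n):
--             for k in range(j + 1, n):
--                 if a[i] + a[j] + a[k] not in s:
--                     return 'NO'
--     return 'YES'
-- ===== SOURCE B (Python) =====
-- def solve(a):
--     pos = 0
--     neg = 0
--     for x in a:
--         if x > 0:
--             pos += 1
--         elif x < 0:
--             neg += 1
--     if pos >= 3 or neg >= 3:
--         return 'NO'
--     cnt = {}
--     for x in a: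
--         cnt[x] = cnt.get(x, 0) + 1
--     small = []
--     for v, c in cnt.items():
--         small.extend([v] * min(c, 3))
--     s = set(a)
--     m = len(small)
--     for i in range(m):
--         for j in range(i + 1, m):
--             for k in range(j + 1, m):
--                 if small[i] + small[j] + small[k] not in s:
--                     return 'NO'
--     return 'YES'
-- ===== Notes on version B (the rewrite author's own statement) =====
-- stated objective: alternative
-- what changed: Replaces the scan over all index triples by a counting pass: with 3 or more positive (or negative) elements the answer is provably NO (the three largest such elements sum to more than the maximum, resp. less than the minimum), and otherwise capping every value's multiplicity at 3 leaves a list of at most 7 elements on which the same triple check is run.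
import Mathlib
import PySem

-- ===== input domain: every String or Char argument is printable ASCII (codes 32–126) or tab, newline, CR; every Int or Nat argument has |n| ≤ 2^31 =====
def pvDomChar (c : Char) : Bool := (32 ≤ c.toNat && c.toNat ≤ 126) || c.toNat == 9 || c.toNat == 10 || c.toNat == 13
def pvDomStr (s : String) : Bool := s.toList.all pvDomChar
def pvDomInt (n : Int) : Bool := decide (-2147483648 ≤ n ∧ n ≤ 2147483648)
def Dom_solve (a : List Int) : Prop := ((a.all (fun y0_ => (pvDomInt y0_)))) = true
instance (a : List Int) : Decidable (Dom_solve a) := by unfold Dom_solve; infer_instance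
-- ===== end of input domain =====

-- B replaces A's scan over all index triples by a counting pass: with ≥3 positive (or ≥3
-- negative) elements the answer is provably "NO"; otherwise capping each value's multiplicity
-- at 3 leaves a list of at most 7 elements on which the same triple check is run.


-- ===== PORT A =====
def solve (a : List Int) : String :=
  let n : Int := PySem.List.len a
  let s : PySem.Set Int := PySem.Set.ofList a
  ((PySem.List.pyRange 0 n 1).findSome? (fun i =>
    (PySem.List.pyRange (i + 1) n 1).findSome? (fun j =>
      (PySem.List.pyRange (j + 1) n 1).findSome? (fun k =>
        if PySem.Set.contains s
            (PySem.List.pyGetD a i 0 + PySem.List.pyGetD a j 0 + PySem.List.pyGetD a k 0) then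
          none
        else some "NO")))).getD "YES"

-- ===== PORT B =====
def solve_alt (a : List Int) : String :=
  let pn : Int × Int := a.foldl
    (fun (pq : Int × Int) x =>
      if x > 0 then (pq.1 + 1, pq.2) else if x < 0 then (pq.1, pq.2 + 1) else pq) (0, 0)
  if pn.1 ≥ 3 ∨ pn.2 ≥ 3 then "NO"
  else
    let cnt : PySem.Dict Int Int :=
      a.foldl (fun d x => d.insert x (d.getD x 0 + 1)) PySem.Dict.empty
    let small : List Int :=
      cnt.items.foldl (fun acc vc => acc ++ List.replicate (min vc.2 3).toNat vc.1) []
    let s : PySem.Set Int := PySem.Set.ofList a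
    let m : Int := PySem.List.len small
    ((PySem.List.pyRange 0 m 1).findSome? (fun i =>
      (PySem.List.pyRange (i + 1) m 1).findSome? (fun j =>
        (PySem.List.pyRange (j + 1) m 1).findSome? (fun k =>
          if PySem.Set.contains s
              (PySem.List.pyGetD small i 0 + PySem.List.pyGetD small j 0 + PySem.List.pyGetD small k 0) then
            none
          else some "NO")))).getD "YES"

-- ===== PRECONDITION & SPEC =====
def Spec_solve (a : List Int) (out : String) : Prop := out = solve_alt a
instance (a : List Int) (out : String) : Decidable (Spec_solve a out) := by unfold Spec_solve; infer_instance

-- ===== CLAIM (what is proved, stated in full; the proofs are below) =====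
def Claim_equal_solve : Prop := ∀ (a : List Int), Dom_solve a → Spec_solve a (solve a)

-- ===== LEMMAS AND PROOFS =====

-- "some triple (with multiplicity) of l sums to a value outside sset"
def Bad (l sset : List Int) : Prop :=
  ∃ x y z : Int, List.Subperm [x, y, z] l ∧ x + y + z ∉ sset

-- proof-only name for the shared shape of the two ports' triple loops
def brute (l sset : List Int) : String :=
  ((PySem.List.pyRange 0 (PySem.List.len l) 1).findSome? (fun i =>
    (PySem.List.pyRange (i + 1) (PySem.List.len l) 1).findSome? (fun j =>
      (PySem.List.pyRange (j + 1) (PySem.List.len l) 1).findSome? (fun k =>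
        if PySem.Set.contains sset
            (PySem.List.pyGetD l i 0 + PySem.List.pyGetD l j 0 + PySem.List.pyGetD l k 0) then
          none
        else some "NO")))).getD "YES"

-- the capped list built by B
def smallOf (a : List Int) : List Int :=
  ((a.foldl (fun d x => d.insert x (d.getD x 0 + 1)) PySem.Dict.empty : PySem.Dict Int Int)).items.foldl
    (fun acc vc => acc ++ List.replicate (min vc.2 3).toNat vc.1) []

lemma solve_eq_brute (a : List Int) : solve a = brute a (PySem.Set.ofList a) := rfl

lemma pyGetD_toNat (l : List Int) (i : Int) (h0 : 0 ≤ i) (hi : i.toNat < l.length) :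
    PySem.List.pyGetD l i 0 = l[i.toNat] := by
  obtain ⟨n, rfl⟩ : ∃ n : Nat, i = (n : Int) := ⟨i.toNat, by omega⟩
  simp only [PySem.List.pyGetD_natCast, Int.toNat_natCast] at *
  exact List.getD_eq_getElem _ _ hi

lemma triple_subperm_int (l : List Int) (i j k : Int) (h0 : 0 ≤ i) (hij : i < j) (hjk : j < k)
    (hk : k < (l.length : Int)) :
    List.Subperm [PySem.List.pyGetD l i 0, PySem.List.pyGetD l j 0, PySem.List.pyGetD l k 0] l := by
  have hi' : i.toNat < l.length := by omega
  have hj' : j.toNat < l.length := by omega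
  have hk' : k.toNat < l.length := by omega
  rw [pyGetD_toNat l i h0 hi', pyGetD_toNat l j (by omega) hj', pyGetD_toNat l k (by omega) hk']
  have hpw : List.Pairwise (fun (x1 x2 : Fin l.length) => x1 < x2)
      [⟨i.toNat, hi'⟩, ⟨j.toNat, hj'⟩, ⟨k.toNat, hk'⟩] := by
    refine List.Pairwise.cons ?_ (List.Pairwise.cons ?_ (List.pairwise_singleton _ _))
    · intro b hb
      simp only [List.mem_cons, List.not_mem_nil, or_false] at hb
      rcases hb with rfl | rfl <;> exact Fin.mk_lt_mk.mpr (by omega)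
    · intro b hb
      simp only [List.mem_singleton] at hb
      subst hb
      exact Fin.mk_lt_mk.mpr (by omega)
  have hs := List.map_getElem_sublist hpw
  simpa using hs.subperm

lemma exists_indices_of_bad (l sset : List Int) (h : Bad l sset) :
    ∃ i j k : Int, 0 ≤ i ∧ i < j ∧ j < k ∧ k < (l.length : Int) ∧
      PySem.List.pyGetD l i 0 + PySem.List.pyGetD l j 0 + PySem.List.pyGetD l k 0 ∉ sset := by
  obtain ⟨x, y, z, hsp, hns⟩ := h
  obtain ⟨c, hperm, hsub⟩ := hsp
  obtain ⟨is, hc, hpw⟩ := List.sublist_eq_map_getElem hsub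
  have hlen : is.length = 3 := by
    have := hperm.length_eq
    simp only [hc, List.length_map, List.length_cons, List.length_nil] at this
    omega
  match is, hlen with
  | [i, j, k], _ =>
    have hij : i < j := by
      rcases hpw with _ | ⟨h1, _⟩
      exact h1 _ (by simp)
    have hjk : j < k := by
      rcases hpw with _ | ⟨_, hpw2⟩
      rcases hpw2 with _ | ⟨h2, _⟩
      exact h2 _ (by simp)
    refine ⟨(i : Nat), (j : Nat), (k : Nat), by omega, by exact_mod_cast hij, by exact_mod_cast hjk,
      by exact_mod_cast k.isLt, ?_⟩
    have e1 : PySem.List.pyGetD l (i : Nat) 0 = l[(i : Nat)] :=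
      pyGetD_toNat l _ (by omega) (by simp)
    have e2 : PySem.List.pyGetD l (j : Nat) 0 = l[(j : Nat)] :=
      pyGetD_toNat l _ (by omega) (by simp)
    have e3 : PySem.List.pyGetD l (k : Nat) 0 = l[(k : Nat)] :=
      pyGetD_toNat l _ (by omega) (by simp)
    have hsum : l[(i : Nat)] + l[(j : Nat)] + l[(k : Nat)] = x + y + z := by
      have := hperm.sum_eq
      simp [hc] at this
      omega
    rw [e1, e2, e3, hsum]
    exact hns

lemma brute_eq_yes (l sset : List Int) (h : ¬ Bad l sset) : brute l sset = "YES" := by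
  unfold brute
  have hnone : ((PySem.List.pyRange 0 (PySem.List.len l) 1).findSome? (fun i =>
    (PySem.List.pyRange (i + 1) (PySem.List.len l) 1).findSome? (fun j =>
      (PySem.List.pyRange (j + 1) (PySem.List.len l) 1).findSome? (fun k =>
        if PySem.Set.contains sset
            (PySem.List.pyGetD l i 0 + PySem.List.pyGetD l j 0 + PySem.List.pyGetD l k 0) then
          none
        else some "NO")))) = none := by
    rw [List.findSome?_eq_none_iff]
    intro i hi
    rw [List.findSome?_eq_none_iff]
    intro j hj
    rw [List.findSome?_eq_none_iff]
    intro k hk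
    rw [PySem.List.mem_pyRange_one] at hi hj hk
    simp only [PySem.List.len_eq] at hi hj hk
    rw [if_pos]
    rw [PySem.Set.contains_iff]
    by_contra hmem
    exact h ⟨_, _, _, triple_subperm_int l i j k hi.1 (by omega) (by omega) (by omega), hmem⟩
  rw [hnone]
  rfl

lemma brute_eq_no (l sset : List Int) (h : Bad l sset) : brute l sset = "NO" := by
  obtain ⟨i, j, k, h0, hij, hjk, hk, hns⟩ := exists_indices_of_bad l sset h
  set F := ((PySem.List.pyRange 0 (PySem.List.len l) 1).findSome? (fun i =>
    (PySem.List.pyRange (i + 1) (PySem.List.len l) 1).findSome? (fun j =>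
      (PySem.List.pyRange (j + 1) (PySem.List.len l) 1).findSome? (fun k =>
        if PySem.Set.contains sset
            (PySem.List.pyGetD l i 0 + PySem.List.pyGetD l j 0 + PySem.List.pyGetD l k 0) then
          none
        else some "NO")))) with hF
  have hne : F ≠ none := by
    intro hn
    rw [hF, List.findSome?_eq_none_iff] at hn
    have h1 := hn i (by rw [PySem.List.mem_pyRange_one]; simp only [PySem.List.len_eq]; omega)
    rw [List.findSome?_eq_none_iff] at h1
    have h2 := h1 j (by rw [PySem.List.mem_pyRange_one]; simp only [PySem.List.len_eq]; omega)
    rw [List.findSome?_eq_none_iff] at h2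
    have h3 := h2 k (by rw [PySem.List.mem_pyRange_one]; simp only [PySem.List.len_eq]; omega)
    rw [if_neg] at h3
    · exact Option.some_ne_none _ h3
    · rw [PySem.Set.contains_iff]
      exact hns
  obtain ⟨r, hr⟩ := Option.ne_none_iff_exists'.mp hne
  have hrno : r = "NO" := by
    rw [hF] at hr
    obtain ⟨i', _, hi'⟩ := List.exists_of_findSome?_eq_some hr
    obtain ⟨j', _, hj'⟩ := List.exists_of_findSome?_eq_some hi'
    obtain ⟨k', _, hk'⟩ := List.exists_of_findSome?_eq_some hj'
    split_ifs at hk'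
    exact (Option.some.inj hk').symm
  show F.getD "YES" = "NO"
  rw [hr, hrno]
  rfl

lemma bad_of_three_pos (a : List Int) (h : 3 ≤ a.countP (fun x => decide (x > 0))) : Bad a a := by
  have hperm := List.mergeSort_perm a (fun x y => decide (y ≤ x))
  have hsorted : (a.mergeSort (fun x y => decide (y ≤ x))).Pairwise (fun p q : Int => q ≤ p) := by
    have hp := List.pairwise_mergeSort (le := fun (x y : Int) => decide (y ≤ x))
      (fun x y z h1 h2 => by simp at *; omega) (fun x y => by simp; omega) a
    exact hp.imp (fun hpq => by simpa using hpq)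
  have hcount : 3 ≤ (a.mergeSort (fun x y => decide (y ≤ x))).countP (fun x => decide (x > 0)) := by
    rwa [List.Perm.countP_eq _ hperm]
  have hlen : 3 ≤ (a.mergeSort (fun x y => decide (y ≤ x))).length :=
    le_trans hcount (List.countP_le_length)
  obtain ⟨t1, t2, t3, r, hb3⟩ : ∃ t1 t2 t3 r,
      a.mergeSort (fun x y => decide (y ≤ x)) = t1 :: t2 :: t3 :: r := by
    match hm : a.mergeSort (fun x y => decide (y ≤ x)), hlen with
    | x :: y :: z :: r, _ => exact ⟨x, y, z, r, rfl⟩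
  rw [hb3] at hsorted hcount hperm
  rw [List.pairwise_cons] at hsorted
  obtain ⟨h1, hs2⟩ := hsorted
  rw [List.pairwise_cons] at hs2
  obtain ⟨h2, hs3⟩ := hs2
  rw [List.pairwise_cons] at hs3
  obtain ⟨h3, _⟩ := hs3
  have ht3 : 0 < t3 := by
    by_contra hns
    have hz : (t3 :: r).countP (fun x => decide (x > 0)) = 0 := by
      rw [List.countP_eq_zero]
      intro x hx
      simp only [decide_eq_true_eq]
      rcases List.mem_cons.mp hx with rfl | hx'
      · omega
      · have := h3 x hx'; omega
    simp only [List.countP_cons, hz] at hcount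
    split_ifs at hcount <;> omega
  have ht2 : t3 ≤ t2 := h2 t3 (by simp)
  have ht1 : t2 ≤ t1 := h1 t2 (by simp)
  refine ⟨t1, t2, t3, ?_, ?_⟩
  · have hsub : [t1, t2, t3].Sublist (t1 :: t2 :: t3 :: r) := by
      have := List.sublist_append_left [t1, t2, t3] r
      simp only [List.cons_append, List.nil_append] at this
      exact this
    exact hsub.subperm.trans hperm.subperm
  · intro hmem
    have hmem' : t1 + t2 + t3 ∈ t1 :: t2 :: t3 :: r := hperm.mem_iff.mpr hmem
    rcases List.mem_cons.mp hmem' with he | hmem'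
    · omega
    · have : t1 + t2 + t3 ≤ t1 := h1 _ hmem'
      omega

lemma bad_map_neg (a : List Int) (h : Bad (a.map (fun x => -x)) (a.map (fun x => -x))) :
    Bad a a := by
  obtain ⟨x, y, z, hsp, hns⟩ := h
  refine ⟨-x, -y, -z, ?_, ?_⟩
  · obtain ⟨c, hcp, hcs⟩ := hsp
    rw [List.sublist_map_iff] at hcs
    obtain ⟨c', hc's, rfl⟩ := hcs
    refine ⟨c', ?_, hc's⟩
    have hm := hcp.map (fun t : Int => -t)
    simpa [List.map_map, Function.comp] using hm
  · intro hmem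
    have h2 := List.mem_map_of_mem (f := fun t : Int => -t) hmem
    simp only [show (fun t : Int => -t) (-x + -y + -z) = x + y + z by ring] at h2
    exact hns h2

lemma bad_of_three_neg (a : List Int) (h : 3 ≤ a.countP (fun x => decide (x < 0))) : Bad a a := by
  apply bad_map_neg
  apply bad_of_three_pos
  rw [List.countP_map]
  have he : ((fun x : Int => decide (x > 0)) ∘ (fun x : Int => -x)) = (fun x : Int => decide (x < 0)) := by
    funext x
    simp only [Function.comp_apply]
    exact decide_eq_decide.mpr (by omega)
  rwa [he]

lemma bad_ofList_iff (l a : List Int) : Bad l (PySem.Set.ofList a) ↔ Bad l a := by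
  unfold Bad
  simp [PySem.Set.mem_ofList]

lemma posneg_fold (a : List Int) (p q : Int) :
    a.foldl (fun (pq : Int × Int) x =>
      if x > 0 then (pq.1 + 1, pq.2) else if x < 0 then (pq.1, pq.2 + 1) else pq) (p, q)
    = (p + (a.countP (fun x => decide (x > 0)) : Int), q + (a.countP (fun x => decide (x < 0)) : Int)) := by
  induction a generalizing p q with
  | nil => simp
  | cons x t ih =>
    simp only [List.foldl_cons, List.countP_cons]
    by_cases h1 : x > 0
    · have h2 : ¬ x < 0 := by omega
      simp [h1, h2, ih]
      omega
    · by_cases h2 : x < 0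
      · simp [h1, h2, ih]
        omega
      · simp [h1, h2, ih]

lemma sum_map_ite_zero (s : List Int) (hnd : s.Nodup) (m : Int → Nat) (v : Int) :
    (s.map (fun k => if v = k then m k else 0)).sum = if v ∈ s then m v else 0 := by
  induction s with
  | nil => simp
  | cons k t ih =>
    rw [List.nodup_cons] at hnd
    by_cases hv : v = k
    · subst hv
      simp [hnd.1, ih hnd.2]
    · simp [hv, ih hnd.2]

lemma smallOf_eq_flatMap (a : List Int) :
    smallOf a = (PySem.Set.ofList a).flatMap
      (fun k => List.replicate (min ((List.count k a : Int)) 3).toNat k) := by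
  unfold smallOf
  rw [PySem.Dict.foldl_insert_getD_add_one_eq_counter, PySem.Dict.items_counter,
    PySem.List.foldl_append_eq_flatMap, List.flatMap_map]
  simp

lemma count_smallOf (a : List Int) (v : Int) :
    List.count v (smallOf a) = min (List.count v a) 3 := by
  rw [smallOf_eq_flatMap, List.count_flatMap]
  have he : (List.count v ∘ fun k => List.replicate (min ((List.count k a : Int)) 3).toNat k)
      = fun k => if v = k then (min ((List.count k a : Int)) 3).toNat else 0 := by
    funext k
    simp only [Function.comp_apply, List.count_replicate, beq_iff_eq]
    split_ifs with h1 h2 h3 <;> first | rfl | (exact absurd h1.symm h2) | (exact absurd h3.symm h1)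
  rw [he, sum_map_ite_zero _ (PySem.Set.nodup_ofList a) _ v]
  by_cases hv : v ∈ a
  · rw [if_pos ((PySem.Set.mem_ofList a v).mpr hv)]
    omega
  · rw [if_neg (fun hc => hv ((PySem.Set.mem_ofList a v).mp hc))]
    have : List.count v a = 0 := List.count_eq_zero.mpr hv
    omega

lemma bad_smallOf_iff (a sset : List Int) : Bad (smallOf a) sset ↔ Bad a sset := by
  constructor
  · rintro ⟨x, y, z, hsp, hns⟩
    have hsub : (smallOf a).Subperm a := by
      rw [List.subperm_ext_iff]
      intro v _
      rw [count_smallOf]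
      omega
    exact ⟨x, y, z, hsp.trans hsub, hns⟩
  · rintro ⟨x, y, z, hsp, hns⟩
    refine ⟨x, y, z, ?_, hns⟩
    rw [List.subperm_ext_iff]
    intro v hv
    rw [count_smallOf]
    have h1 := List.subperm_ext_iff.mp hsp v hv
    have h2 : List.count v [x, y, z] ≤ 3 := by
      have := List.count_le_length (a := v) (l := [x, y, z])
      simpa using this
    omega

lemma solve_alt_eq (a : List Int) :
    solve_alt a =
      if 3 ≤ a.countP (fun x => decide (x > 0)) ∨ 3 ≤ a.countP (fun x => decide (x < 0)) then "NO"
      else brute (smallOf a) (PySem.Set.ofList a) := by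
  unfold solve_alt
  rw [posneg_fold]
  simp only [zero_add]
  split_ifs with hA hB hB
  · rfl
  · exfalso; omega
  · exfalso; omega
  · rfl

-- ===== VERDICT (by name: the statement is the Claim_ definition above) =====
theorem solve_spec : Claim_equal_solve := by
  intro a _
  show solve a = solve_alt a
  rw [solve_eq_brute, solve_alt_eq]
  by_cases hp : 3 ≤ a.countP (fun x => decide (x > 0)) ∨ 3 ≤ a.countP (fun x => decide (x < 0))
  · rw [if_pos hp]
    apply brute_eq_no
    rw [bad_ofList_iff]
    rcases hp with hp | hp
    · exact bad_of_three_pos a hp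
    · exact bad_of_three_neg a hp
  · rw [if_neg hp]
    by_cases hb : Bad a (PySem.Set.ofList a)
    · rw [brute_eq_no a _ hb, brute_eq_no _ _ ((bad_smallOf_iff a _).mpr hb)]
    · rw [brute_eq_yes a _ hb, brute_eq_yes _ _ (fun h => hb ((bad_smallOf_iff a _).mp h))]
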